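-- pv_equiv track=rewrite | github.com/lumirevel/baekjoon | baek1081.py | sum_all_digit
-- ===== SOURCE A (Python) =====
-- from copy import deepcopy as copy
--
-- def sum_all_digit(L:int, U:int) -> int:
--     """
--     L부터 U까지의 모든 수의 모든 자리의 숫자를 더한 값을 출력함
--     :param L: 시작값
--     :param U: 끝값
--     :return: L부터 U까지의 모든 수의 모든 자리의 숫자를 더한 값
--     """
--     def digitize_10(Q: int) -> list[int]:
--         """
--         Q를 십진 체계에 따라 list로 만들어 특정 자리의 숫자에 접근할 수 있도록 함
--         :param Q: 정수
--         :return: Q를 자릿수마다 자른 list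
--         """
--         digits = []
--         while Q:
--             digits.append(Q % 10)
--             Q //= 10
--         return digits
--     def digit_2_int(digits: list[int]) -> int:
--         """
--         십진 체계에 따라 list로 만들어진 digits list를 다시 int로 바꿔줌
--         :param digits: 정수를 자릿수마다 자른 list
--         :return: digits에 해당하는 정수
--         """
--         Q = 0
--         digit_count = 1
--         for v in digits:
--             Q += v * digit_count
--             digit_count *= 10
--         return Q
--     def cumul_sum(s, e):
--         return (e*(e+1)-s*(s-1))//2
--     def sum_all_digit_unit(S:list[int], E:list[int]) -> tuple[int, int]:
--         """
--         sum_all_digit의 unit. 재귀적인 방법으로 L부터 U까지의 모든 수의 모든 자리의 숫자를 더하기 위해 사용됨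
--         :param S: 시작값
--         :param E: 끝값
--         :return: S와 E 사이의 수의 갯수와 모든 자리의 숫자를 더한 값
--         """
--         S, E = copy(S), copy(E)
--         digits_sum, count = 0, 0
--         if len(S) == len(E):
--             overlab_sum = 0
--             while len(S) and S[-1] == E[-1]:
--                 overlab_sum += (S.pop() + E.pop()) // 2
--             if overlab_sum:
--                 child = sum_all_digit_unit(S, E)
--
--                 digits_sum += overlab_sum * child[0] + child[1]
--                 count += child[0]
--             else:
--                 if len(S) == 0:
--                     count += 1
--                 elif len(S) == 1:
--                     digits_sum += cumul_sum(S[-1], E[-1])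
--                     count += E[-1]-S[-1]+1
--                 else:
--                     S_now, E_now = S.pop(), E.pop()
--                     if E_now - S_now == 1:
--                         value_front = sum_all_digit_unit(S, [9 for _ in range(len(S))])
--                         value_end = sum_all_digit_unit([0 for _ in range(len(E))], E)
--
--                         digits_sum += S_now * value_front[0] + value_front[1] + E_now * value_end[0] + value_end[1]
--                         count += value_front[0] + value_end[0]
--                     else:
--                         value_front = sum_all_digit_unit(S, [9 for _ in range(len(S))])
--                         value_end = sum_all_digit_unit([0 for _ in range(len(E))], E)
--
--                         digits_sum += S_now * value_front[0] + value_front[1]\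
--                                + cumul_sum(S_now+1, E_now-1) * 10 ** len(S) + (E_now - S_now - 1) * len(S) * 45 * 10 ** (len(S)-1)\
--                                + E_now * value_end[0] + value_end[1]
--                         count += value_front[0] + (E_now-S_now-1) * 10**len(S) + value_end[0]
--         else:
--             for i in range(len(S) + 1, len(E) - 1+1):
--                 digits_sum += 45 * 10**(i-1)
--                 digits_sum += (i-1) * 45 * 9 * 10**(i-2)
--                 count += 10**i
--             value_front = sum_all_digit_unit(S, [9 for _ in range(len(S))])
--             value_end = sum_all_digit_unit([1 if i == len(E) - 1 else 0 for i in range(len(E))], E)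
--             digits_sum += value_front[1] + value_end[1]
--             count += value_front[0] + value_end[0]
--         return (count, digits_sum)
--     return sum_all_digit_unit(digitize_10(L), digitize_10(U))[1]
-- ===== SOURCE B (Python) =====
-- def sum_all_digit(L: int, U: int) -> int:
--     """Sum of all digits of all numbers in [L, U], via prefix sums D(n) = sum of
--     digit sums of 0..n-1, computed by a one-sided digit recurrence."""
--     def ds(n: int) -> int:
--         s = 0
--         while n:
--             s += n % 10
--             n //= 10
--         return s
--
--     def D(n: int) -> int:
--         # sum of digit sums of all k in [0, n)
--         if n <= 0:
--             return 0
--         q, r = divmod(n, 10)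
--         return 10 * D(q) + 45 * q + r * ds(q) + r * (r - 1) // 2
--
--     return D(U + 1) - D(L)
-- ===== Notes on version B (the rewrite author's own statement) =====
-- stated objective: simpler
-- what changed: Replaces A's two-sided recursive interval splitting over digit lists by a one-sided prefix sum D(n)=sum of digit sums of 0..n-1 computed with the single digit recurrence D(10q+r)=10D(q)+45q+r*ds(q)+r(r-1)/2, returning D(U+1)-D(L).
-- outside the precondition, e.g. on sum_all_digit(5, 3): A returns -4, B returns -4; on sum_all_digit(1, 0): A returns 45, B returns 0; on sum_all_digit(0, 10): A returns 46.0, B returns 46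
import Mathlib
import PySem

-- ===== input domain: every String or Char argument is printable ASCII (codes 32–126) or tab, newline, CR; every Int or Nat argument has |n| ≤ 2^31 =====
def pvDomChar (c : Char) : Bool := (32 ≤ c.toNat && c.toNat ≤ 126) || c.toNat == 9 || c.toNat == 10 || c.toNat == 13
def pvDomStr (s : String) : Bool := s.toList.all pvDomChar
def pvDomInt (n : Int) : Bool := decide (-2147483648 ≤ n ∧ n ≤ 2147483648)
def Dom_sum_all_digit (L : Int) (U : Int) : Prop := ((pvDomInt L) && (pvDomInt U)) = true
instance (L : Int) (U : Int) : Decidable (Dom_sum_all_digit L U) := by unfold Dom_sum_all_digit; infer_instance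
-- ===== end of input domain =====

-- B replaces A's two-sided recursive digit-list interval splitting by a one-sided
-- prefix sum D(n) (= sum of digit sums of 0..n-1) with a single digit recurrence;
-- objective: simpler (no speed claim).


-- ===== PORT A =====
-- digitize_10: little-endian digit list; Python's 'while Q:' loop diverges for Q < 0,
-- so the port carries fuel (64 is enough for every |Q| ≤ 2^31; negatives are outside Pre_).
def pvDigitize : Nat → Int → List Int
  | 0, _ => []
  | f + 1, q => if q ≠ 0 then PySem.Int.mod q 10 :: pvDigitize f (PySem.Int.floordiv q 10) else []

-- cumul_sum
def pvCumul (s e : Int) : Int := PySem.Int.floordiv (e * (e + 1) - s * (s - 1)) 2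

-- the 'while len(S) and S[-1] == E[-1]: overlab_sum += (S.pop() + E.pop()) // 2' loop
def pvPopLoop : Nat → List Int → List Int → Int → List Int × List Int × Int
  | 0, S, E, acc => (S, E, acc)
  | f + 1, S, E, acc =>
    match S.getLast?, E.getLast? with
    | some s, some e =>
      if s = e then pvPopLoop f S.dropLast E.dropLast (acc + PySem.Int.floordiv (s + e) 2)
      else (S, E, acc)
    | _, _ => (S, E, acc)

-- sum_all_digit_unit, with fuel for the recursion (Python recurses on shorter lists;
-- fuel 64 exceeds every recursion depth reachable from ≤ 64-digit inputs).
def pvUnit : Nat → List Int → List Int → Int × Int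
  | 0, _, _ => (0, 0)
  | f + 1, S, E =>
    if S.length = E.length then
      let r := pvPopLoop S.length S E 0
      let S' := r.1
      let E' := r.2.1
      let osum := r.2.2
      if osum ≠ 0 then
        let child := pvUnit f S' E'
        (child.1, osum * child.1 + child.2)
      else if S'.length = 0 then (1, 0)
      else if S'.length = 1 then
        (E'.getLastD 0 - S'.getLastD 0 + 1, pvCumul (S'.getLastD 0) (E'.getLastD 0))
      else
        let s := S'.getLastD 0
        let e := E'.getLastD 0
        let S2 := S'.dropLast
        let E2 := E'.dropLast
        if e - s = 1 then
          let vf := pvUnit f S2 (List.replicate S2.length 9)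
          let ve := pvUnit f (List.replicate E2.length 0) E2
          (vf.1 + ve.1, s * vf.1 + vf.2 + e * ve.1 + ve.2)
        else
          let vf := pvUnit f S2 (List.replicate S2.length 9)
          let ve := pvUnit f (List.replicate E2.length 0) E2
          (vf.1 + (e - s - 1) * 10 ^ S2.length + ve.1,
           s * vf.1 + vf.2 + pvCumul (s + 1) (e - 1) * 10 ^ S2.length
             + (e - s - 1) * (S2.length : Int) * 45 * 10 ^ (S2.length - 1)
             + e * ve.1 + ve.2)
    else
      -- for i in range(len(S)+1, len(E)-1+1): accumulate (count, digits_sum)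
      -- (for i = 1 Python's 0 * 45 * 9 * 10**(-1) is the float 0.0; that case, L = 0 ∧ U ≥ 10,
      --  is outside Pre_; here the i = 1 term of the sum is likewise 0)
      let loop := (List.range' (S.length + 1) (E.length - S.length - 1)).foldl
        (fun (acc : Int × Int) (i : Nat) =>
          (acc.1 + (10 : Int) ^ i,
           acc.2 + 45 * (10 : Int) ^ (i - 1) + ((i : Int) - 1) * 45 * 9 * (10 : Int) ^ (i - 2)))
        (0, 0)
      let vf := pvUnit f S (List.replicate S.length 9)
      let ve := pvUnit f (List.replicate (E.length - 1) 0 ++ [1]) E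
      (loop.1 + vf.1 + ve.1, loop.2 + vf.2 + ve.2)

def sum_all_digit (L : Int) (U : Int) : Int :=
  (pvUnit 64 (pvDigitize 64 L) (pvDigitize 64 U)).2

-- ===== PORT B =====
-- ds(n): digit sum by the 'while n:' loop (fuel 64; only called on n ≥ 0)
def pvDsLoop : Nat → Int → Int → Int
  | 0, _, s => s
  | f + 1, n, s =>
    if n ≠ 0 then pvDsLoop f (PySem.Int.floordiv n 10) (s + PySem.Int.mod n 10) else s

-- D(n): sum of digit sums of all k in [0, n), by the recurrence on n // 10 (fuel 64)
def pvD : Nat → Int → Int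
  | 0, _ => 0
  | f + 1, n =>
    if n ≤ 0 then 0
    else
      let q := PySem.Int.floordiv n 10
      let r := PySem.Int.mod n 10
      10 * pvD f q + 45 * q + r * pvDsLoop 64 q 0 + PySem.Int.floordiv (r * (r - 1)) 2

def sum_all_digit_alt (L : Int) (U : Int) : Int := pvD 64 (U + 1) - pvD 64 L

-- ===== PRECONDITION & SPEC =====
-- Pre_ excludes: negative bounds (A's digitize loop 'while Q:' never terminates there);
-- L > U (empty range — A returns accidental values from its interval splitting, e.g. 45 for (1,0));
-- and L = 0 with U ≥ 10, where A's '0 * 45 * 9 * 10**(-1)' makes it return a FLOAT (e.g. 46.0),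
-- not a value of the declared int type.
def Pre_sum_all_digit (L : Int) (U : Int) : Prop :=
  0 ≤ L ∧ L ≤ U ∧ ¬(L = 0 ∧ 10 ≤ U)
instance (L : Int) (U : Int) : Decidable (Pre_sum_all_digit L U) := by
  unfold Pre_sum_all_digit; infer_instance

def pvWitness_sum_all_digit : Int × Int := (3, 77)

def Spec_sum_all_digit (L : Int) (U : Int) (out : Int) : Prop := out = sum_all_digit_alt L U
instance (L : Int) (U : Int) (out : Int) : Decidable (Spec_sum_all_digit L U out) := by
  unfold Spec_sum_all_digit; infer_instance

-- ===== CLAIM (what is proved, stated in full; the proofs are below) =====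
def Claim_equal_sum_all_digit : Prop :=
  ∀ (L : Int) (U : Int), Dom_sum_all_digit L U → Pre_sum_all_digit L U →
    Spec_sum_all_digit L U (sum_all_digit L U)

-- ===== LEMMAS AND PROOFS =====

-- digit sum of a natural number, and Dsum n = sum of digit sums of 0..n-1
def dsN (n : Nat) : Nat := (Nat.digits 10 n).sum
def Dsum (n : Nat) : Nat := ∑ k ∈ Finset.range n, dsN k
def triN (n : Nat) : Nat := n * (n - 1) / 2

-- value of a little-endian digit list, and the digit-range predicate
def pvVal : List Int → Int
  | [] => 0
  | d :: t => d + 10 * pvVal t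

def pvDigitsOk (S : List Int) : Prop := ∀ d ∈ S, 0 ≤ d ∧ d ≤ 9

lemma dsN_zero : dsN 0 = 0 := by simp [dsN]

lemma dsN_mul_add (q b : Nat) (hb : b < 10) : dsN (10 * q + b) = b + dsN q := by
  rcases Nat.eq_zero_or_pos (10 * q + b) with h0 | hpos
  · have hq : q = 0 := by omega
    have hb0 : b = 0 := by omega
    subst hq; subst hb0; simp [dsN]
  · unfold dsN
    rw [Nat.digits_def' (by norm_num : (1:Nat) < 10) hpos]
    have h1 : (10 * q + b) % 10 = b := by omega
    have h2 : (10 * q + b) / 10 = q := by omega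
    simp [h1, h2]

lemma dsN_lt10 (n : Nat) (h : n < 10) : dsN n = n := by
  have := dsN_mul_add 0 n h
  simpa [dsN_zero] using this

lemma dsN_split (m : Nat) : ∀ (h x : Nat), x < 10 ^ m → dsN (h * 10 ^ m + x) = dsN h + dsN x := by
  induction m with
  | zero => intro h x hx; interval_cases x; simp [dsN_zero]
  | succ m ih =>
    intro h x hx
    have hx10 : x / 10 < 10 ^ m := by
      rw [Nat.div_lt_iff_lt_mul (by norm_num)]
      calc x < 10 ^ (m+1) := hx
        _ = 10 ^ m * 10 := by ring
    have hre : h * 10 ^ (m+1) + x = 10 * (h * 10 ^ m + x / 10) + x % 10 := by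
      have : x = 10 * (x / 10) + x % 10 := by omega
      ring_nf
      omega
    rw [hre, dsN_mul_add _ _ (by omega), ih h (x/10) hx10]
    have : dsN x = x % 10 + dsN (x / 10) := by
      have := dsN_mul_add (x / 10) (x % 10) (by omega)
      rw [show 10 * (x/10) + x % 10 = x by omega] at this
      exact this
    omega

lemma Dsum_zero : Dsum 0 = 0 := by simp [Dsum]

lemma Dsum_succ (n : Nat) : Dsum (n + 1) = Dsum n + dsN n := by
  simp [Dsum, Finset.sum_range_succ]

lemma Dsum_one : Dsum 1 = 0 := by
  rw [show (1:Nat) = 0 + 1 from rfl, Dsum_succ, Dsum_zero, dsN_zero]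

lemma Dsum_tenfold (q : Nat) : Dsum (10 * q) = 10 * Dsum q + 45 * q := by
  induction q with
  | zero => simp [Dsum]
  | succ q ih =>
    have e1 : 10 * (q + 1) = ((((((((((10 * q) + 1) + 1) + 1) + 1) + 1) + 1) + 1) + 1) + 1) + 1 := by omega
    rw [e1, Dsum_succ, Dsum_succ, Dsum_succ, Dsum_succ, Dsum_succ, Dsum_succ, Dsum_succ,
      Dsum_succ, Dsum_succ, Dsum_succ, ih]
    have h0 : dsN (10 * q) = 0 + dsN q := by
      have := dsN_mul_add q 0 (by norm_num); omega
    have h   : ∀ b, b < 10 → dsN (10 * q + b) = b + dsN q := fun b hb => dsN_mul_add q b hb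
    have h1 := h 1 (by norm_num); have h2 := h 2 (by norm_num); have h3 := h 3 (by norm_num)
    have h4 := h 4 (by norm_num); have h5 := h 5 (by norm_num); have h6 := h 6 (by norm_num)
    have h7 := h 7 (by norm_num); have h8 := h 8 (by norm_num); have h9 := h 9 (by norm_num)
    have e2 : ∀ b, 10 * q + 1 + b = 10 * q + (1 + b) := by omega
    rw [h0]
    rw [show 10*q+1 = 10*q+1 from rfl, h1]
    rw [show 10*q+1+1 = 10*q+2 by omega, h2]
    rw [show 10*q+1+1+1 = 10*q+3 by omega, h3]
    rw [show 10*q+1+1+1+1 = 10*q+4 by omega, h4]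
    rw [show 10*q+1+1+1+1+1 = 10*q+5 by omega, h5]
    rw [show 10*q+1+1+1+1+1+1 = 10*q+6 by omega, h6]
    rw [show 10*q+1+1+1+1+1+1+1 = 10*q+7 by omega, h7]
    rw [show 10*q+1+1+1+1+1+1+1+1 = 10*q+8 by omega, h8]
    rw [show 10*q+1+1+1+1+1+1+1+1+1 = 10*q+9 by omega, h9]
    have : Dsum (q+1) = Dsum q + dsN q := Dsum_succ q
    omega

lemma triN_succ (n : Nat) : triN (n + 1) = triN n + n := by
  unfold triN
  cases n with
  | zero => rfl
  | succ k =>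
    have h : (k + 1 + 1) * (k + 1 + 1 - 1) = (k + 1) * (k + 1 - 1) + 2 * (k + 1) := by
      simp; ring
    omega

lemma Dsum_block (q r : Nat) (hr : r < 10) :
    Dsum (10 * q + r) = 10 * Dsum q + 45 * q + r * dsN q + triN r := by
  induction r with
  | zero => simpa [triN] using Dsum_tenfold q
  | succ r ih =>
    have hr' : r < 10 := by omega
    rw [show 10 * q + (r+1) = (10 * q + r) + 1 by omega, Dsum_succ, ih hr',
      dsN_mul_add q r hr', triN_succ]
    have : (r+1) * dsN q = r * dsN q + dsN q := by ring
    omega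

lemma Dsum_shift (h m : Nat) : ∀ (t : Nat), t ≤ 10 ^ m →
    Dsum (h * 10 ^ m + t) = Dsum (h * 10 ^ m) + t * dsN h + Dsum t := by
  intro t
  induction t with
  | zero => simp [Dsum_zero]
  | succ t ih =>
    intro ht
    rw [show h * 10 ^ m + (t+1) = (h * 10 ^ m + t) + 1 by omega, Dsum_succ,
      ih (by omega), dsN_split m h t (by omega), Dsum_succ]
    have : (t+1) * dsN h = t * dsN h + dsN h := by ring
    omega

lemma Dsum_pow (m : Nat) (hm : 1 ≤ m) : Dsum (10 ^ m) = m * 45 * 10 ^ (m - 1) := by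
  induction m with
  | zero => omega
  | succ m ih =>
    rcases Nat.eq_zero_or_pos m with h0 | hpos
    · subst h0
      rw [show (10:Nat) ^ 1 = 10 * 1 by norm_num, Dsum_tenfold, Dsum_one]; norm_num
    · have e1 : (10:Nat) ^ (m+1) = 10 * 10 ^ m := by ring
      rw [e1, Dsum_tenfold, ih hpos]
      have e2 : (10:Nat) ^ m = 10 ^ (m-1) * 10 := by
        rw [← pow_succ]; congr 1; omega
      calc 10 * (m * 45 * 10 ^ (m-1)) + 45 * 10 ^ m
          = m * 45 * (10 ^ (m-1) * 10) + 45 * 10 ^ m := by ring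
        _ = m * 45 * 10 ^ m + 45 * 10 ^ m := by rw [← e2]
        _ = (m + 1) * 45 * 10 ^ (m + 1 - 1) := by simp; ring

lemma Dsum_small (n : Nat) (h : n ≤ 10) : Dsum n = triN n := by
  rcases Nat.lt_or_ge n 10 with h10 | h10
  · have := Dsum_block 0 n h10
    simpa [Dsum_zero, dsN_zero] using this
  · have hn : n = 10 := by omega
    subst hn
    rw [show (10:Nat) = 10 * 1 by norm_num, Dsum_tenfold, Dsum_one]
    simp [triN]

-- telescope over a leading digit, stated in ℤ

lemma Dsum_lead (k : Nat) : ∀ (sn en : Nat), sn ≤ en → en ≤ 10 →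
    (Dsum (en * 10 ^ k) : Int) =
      (Dsum (sn * 10 ^ k) : Int) + ((triN en : Int) - triN sn) * 10 ^ k
        + ((en : Int) - sn) * Dsum (10 ^ k) := by
  intro sn en
  induction en with
  | zero => intro h _; have : sn = 0 := by omega
            subst this; simp
  | succ en ih =>
    intro hse he
    rcases Nat.lt_or_ge en sn with hlt | hge
    · have : sn = en + 1 := by omega
      subst this; simp
    · have he' : en ≤ 10 := by omega
      have hlt10 : en < 10 := by omega
      have step : (Dsum ((en+1) * 10 ^ k) : Int) =
          (Dsum (en * 10 ^ k) : Int) + (en : Int) * 10 ^ k + Dsum (10 ^ k) := by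
        have := Dsum_shift en k (10 ^ k) (le_refl _)
        rw [show en * 10 ^ k + 10 ^ k = (en + 1) * 10 ^ k by ring] at this
        rw [this, dsN_lt10 en hlt10]
        push_cast; ring
      rw [step, ih hge he', triN_succ]
      push_cast; ring

lemma fd10 (n : Nat) : PySem.Int.floordiv (n : Int) 10 = ((n / 10 : Nat) : Int) := by
  exact_mod_cast PySem.Int.floordiv_natCast n 10

lemma md10 (n : Nat) : PySem.Int.mod (n : Int) 10 = ((n % 10 : Nat) : Int) := by
  exact_mod_cast PySem.Int.mod_natCast n 10

lemma pvDsLoop_eq : ∀ (f : Nat) (n : Nat) (acc : Int), n < 10 ^ f →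
    pvDsLoop f (n : Int) acc = acc + dsN n := by
  intro f
  induction f with
  | zero => intro n acc h
            have : n = 0 := by omega
            subst this; simp [pvDsLoop, dsN_zero]
  | succ f ih =>
    intro n acc h
    rcases Nat.eq_zero_or_pos n with h0 | hpos
    · subst h0; simp [pvDsLoop, dsN_zero]
    · have hne : (n : Int) ≠ 0 := by exact_mod_cast Nat.pos_iff_ne_zero.mp hpos
      rw [pvDsLoop, if_pos hne, fd10, md10]
      have hlt : n / 10 < 10 ^ f := by
        rw [Nat.div_lt_iff_lt_mul (by norm_num)]
        calc n < 10 ^ (f+1) := h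
          _ = 10 ^ f * 10 := by ring
      rw [ih (n / 10) _ hlt]
      have hds : dsN n = n % 10 + dsN (n / 10) := by
        have := dsN_mul_add (n / 10) (n % 10) (by omega)
        rw [show 10 * (n / 10) + n % 10 = n by omega] at this
        exact this
      rw [hds]; push_cast; ring

lemma triN_cast (r : Nat) :
    PySem.Int.floordiv ((r : Int) * ((r : Int) - 1)) 2 = (triN r : Int) := by
  have h2 : (0:Int) < 2 := by norm_num
  rw [PySem.Int.floordiv_eq_ediv_of_pos h2]
  cases r with
  | zero => simp [triN]
  | succ k =>
    have e1 : ((k+1 : Nat) : Int) * (((k+1 : Nat) : Int) - 1) = (((k+1) * k : Nat) : Int) := by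
      push_cast; ring
    rw [e1]
    have hd : (2:Nat) ∣ (k+1) * k := by
      have := Nat.even_mul_succ_self k
      rw [Nat.mul_comm] at this
      exact this.two_dvd
    have e2 : ((k+1) * k : Nat) = 2 * triN (k+1) := by
      unfold triN
      simp only [Nat.add_sub_cancel]
      exact (Nat.mul_div_cancel' hd).symm
    rw [e2]
    push_cast
    exact Int.mul_ediv_cancel_left _ (by norm_num)

lemma pvD_eq : ∀ (f : Nat) (n : Nat), n < 10 ^ f → f ≤ 64 →
    pvD f (n : Int) = Dsum n := by
  intro f
  induction f with
  | zero => intro n h _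
            have : n = 0 := by omega
            subst this; simp [pvD, Dsum_zero]
  | succ f ih =>
    intro n h hf
    rcases Nat.eq_zero_or_pos n with h0 | hpos
    · subst h0; simp [pvD, Dsum_zero]
    · have hng : ¬ ((n : Int) ≤ 0) := by
        have hx : (0:Int) < n := by exact_mod_cast hpos
        omega
      rw [pvD, if_neg hng]
      simp only [fd10, md10]
      have hq : n / 10 < 10 ^ f := by
        rw [Nat.div_lt_iff_lt_mul (by norm_num)]
        calc n < 10 ^ (f+1) := h
          _ = 10 ^ f * 10 := by ring
      have hq64 : n / 10 < 10 ^ 64 := by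
        have : (10:Nat) ^ f ≤ 10 ^ 64 := Nat.pow_le_pow_right (by norm_num) (by omega)
        omega
      rw [ih (n / 10) hq (by omega), pvDsLoop_eq 64 (n / 10) 0 hq64, triN_cast]
      have := Dsum_block (n / 10) (n % 10) (by omega)
      rw [show 10 * (n / 10) + n % 10 = n by omega] at this
      rw [this]; push_cast; ring

lemma pvVal_nonneg (S : List Int) (h : pvDigitsOk S) : 0 ≤ pvVal S := by
  induction S with
  | nil => simp [pvVal]
  | cons d t ih =>
    have hd := h d (by simp)
    have ht : pvDigitsOk t := fun x hx => h x (by simp [hx])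
    have := ih ht
    simp only [pvVal]
    omega

lemma pvVal_lt (S : List Int) (h : pvDigitsOk S) : pvVal S < 10 ^ S.length := by
  induction S with
  | nil => simp [pvVal]
  | cons d t ih =>
    have hd := h d (by simp)
    have ht : pvDigitsOk t := fun x hx => h x (by simp [hx])
    have h1 := ih ht
    simp only [pvVal, List.length_cons]
    have : (10:Int) ^ (t.length + 1) = 10 * 10 ^ t.length := by ring
    rw [this]
    omega

lemma pvVal_append (S C : List Int) :
    pvVal (S ++ C) = pvVal S + 10 ^ S.length * pvVal C := by
  induction S with
  | nil => simp [pvVal]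
  | cons d t ih =>
    simp only [List.cons_append, pvVal, ih, List.length_cons]
    have : (10:Int) ^ (t.length + 1) = 10 * 10 ^ t.length := by ring
    rw [this]; ring

lemma pvVal_replicate9 (m : Nat) : pvVal (List.replicate m 9) = 10 ^ m - 1 := by
  induction m with
  | zero => simp [pvVal]
  | succ m ih =>
    rw [List.replicate_succ]
    simp only [pvVal, ih]
    have : (10:Int) ^ (m + 1) = 10 * 10 ^ m := by ring
    rw [this]; ring

lemma pvVal_replicate0 (m : Nat) : pvVal (List.replicate m 0) = 0 := by
  induction m with
  | zero => simp [pvVal]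
  | succ m ih => rw [List.replicate_succ]; simp [pvVal, ih]

lemma pvSum_nonneg (C : List Int) (h : pvDigitsOk C) : 0 ≤ C.sum := by
  induction C with
  | nil => simp
  | cons d t ih =>
    have hd := h d (by simp)
    have ht : pvDigitsOk t := fun x hx => h x (by simp [hx])
    have := ih ht
    simp only [List.sum_cons]
    omega

lemma pvVal_zero_of_sum (C : List Int) (h : pvDigitsOk C) (hs : C.sum = 0) : pvVal C = 0 := by
  induction C with
  | nil => simp [pvVal]
  | cons d t ih =>
    have hd := h d (by simp)
    have ht : pvDigitsOk t := fun x hx => h x (by simp [hx])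
    have hts : 0 ≤ t.sum := pvSum_nonneg t ht
    simp only [List.sum_cons] at hs
    have hd0 : d = 0 := by omega
    have ht0 : t.sum = 0 := by omega
    simp [pvVal, hd0, ih ht ht0]

lemma dsN_of_digits (C : List Int) (h : pvDigitsOk C) :
    (dsN (pvVal C).toNat : Int) = C.sum := by
  induction C with
  | nil => simp [pvVal, dsN_zero]
  | cons d t ih =>
    have hd := h d (by simp)
    have ht : pvDigitsOk t := fun x hx => h x (by simp [hx])
    have htn : 0 ≤ pvVal t := pvVal_nonneg t ht
    have e1 : (d + 10 * pvVal t).toNat = 10 * (pvVal t).toNat + d.toNat := by omega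
    simp only [pvVal, List.sum_cons]
    rw [e1, dsN_mul_add _ _ (by omega)]
    push_cast
    rw [ih ht]
    omega

lemma pvPopLoop_spec : ∀ (f : Nat) (S E : List Int) (acc : Int), S.length ≤ f →
    S.length = E.length →
    ∃ C S' E', S = S' ++ C ∧ E = E' ++ C ∧ S'.length = E'.length ∧
      pvPopLoop f S E acc = (S', E', acc + C.sum) ∧
      (S' ≠ [] → S'.getLastD 0 ≠ E'.getLastD 0) := by
  intro f
  induction f with
  | zero =>
    intro S E acc hf hl
    have hS : S = [] := by
      cases S with
      | nil => rfl
      | cons x t => simp at hf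
    subst hS
    have hE : E = [] := by
      cases E with
      | nil => rfl
      | cons x t => simp at hl
    subst hE
    exact ⟨[], [], [], by simp, by simp, rfl, by simp [pvPopLoop], by simp⟩
  | succ f ih =>
    intro S E acc hf hl
    rcases hS : S.getLast? with _ | s
    · have hSnil : S = [] := by simpa using hS
      subst hSnil
      have hEnil : E = [] := by
        cases E with
        | nil => rfl
        | cons x t => simp at hl
      subst hEnil
      exact ⟨[], [], [], by simp, by simp, rfl, by simp [pvPopLoop], by simp⟩
    · rcases hE : E.getLast? with _ | e
      · have hEnil : E = [] := by simpa using hE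
        subst hEnil
        have : S = [] := by cases S <;> simp_all
        subst this
        simp at hS
      · have hSne : S ≠ [] := by intro h; subst h; simp at hS
        have hEne : E ≠ [] := by intro h; subst h; simp at hE
        have hstep : pvPopLoop (f + 1) S E acc =
            (if s = e then pvPopLoop f S.dropLast E.dropLast (acc + PySem.Int.floordiv (s + e) 2)
             else (S, E, acc)) := by
          simp [pvPopLoop, hS, hE]
        by_cases hse : s = e
        · subst hse
          rw [hstep, if_pos rfl]
          have hSs : S = S.dropLast ++ [s] := (List.dropLast_append_getLast? s hS).symm
          have hEs : E = E.dropLast ++ [s] := (List.dropLast_append_getLast? s hE).symm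
          have hfl : S.dropLast.length ≤ f := by
            have := List.length_pos_iff.mpr hSne
            simp [List.length_dropLast]
            omega
          have hl' : S.dropLast.length = E.dropLast.length := by
            simp [List.length_dropLast, hl]
          have hfd : PySem.Int.floordiv (s + s) 2 = s := by
            rw [PySem.Int.floordiv_eq_ediv_of_pos (by norm_num : (0:Int) < 2),
              show s + s = 2 * s by ring]
            exact Int.mul_ediv_cancel_left _ (by norm_num)
          obtain ⟨C, S', E', h1, h2, h3, h4, h5⟩ :=
            ih S.dropLast E.dropLast (acc + PySem.Int.floordiv (s + s) 2) hfl hl'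
          refine ⟨C ++ [s], S', E', ?_, ?_, h3, ?_, h5⟩
          · conv_lhs => rw [hSs]
            rw [h1, List.append_assoc]
          · conv_lhs => rw [hEs]
            rw [h2, List.append_assoc]
          · rw [h4, hfd]
            simp
            ring
        · rw [hstep, if_neg hse]
          refine ⟨[], S, E, by simp, by simp, hl, by simp, ?_⟩
          intro _
          rw [List.getLastD_eq_getLast?, List.getLastD_eq_getLast?, hS, hE]
          simpa using hse

lemma pvDigitize_zero (f : Nat) : pvDigitize f 0 = [] := by
  cases f <;> simp [pvDigitize]

lemma pvDigitize_spec : ∀ (f : Nat) (n : Nat), n < 10 ^ f →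
    pvVal (pvDigitize f (n : Int)) = n ∧ pvDigitsOk (pvDigitize f (n : Int)) ∧
      (n ≠ 0 → pvDigitize f (n : Int) ≠ [] ∧
        10 ^ ((pvDigitize f (n : Int)).length - 1) ≤ n) := by
  intro f
  induction f with
  | zero =>
    intro n h
    have : n = 0 := by omega
    subst this
    refine ⟨by simp [pvDigitize, pvVal], ?_, by simp⟩
    intro d hd; simp [pvDigitize] at hd
  | succ f ih =>
    intro n h
    rcases Nat.eq_zero_or_pos n with h0 | hpos
    · subst h0
      refine ⟨by simp [pvDigitize_zero, pvVal], ?_, by simp⟩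
      intro d hd; simp [pvDigitize_zero] at hd
    · have hne : (n : Int) ≠ 0 := by
        have : (0:Int) < n := by exact_mod_cast hpos
        omega
      have hq : n / 10 < 10 ^ f := by
        rw [Nat.div_lt_iff_lt_mul (by norm_num)]
        calc n < 10 ^ (f+1) := h
          _ = 10 ^ f * 10 := by ring
      obtain ⟨ihv, ihok, ihne⟩ := ih (n / 10) hq
      have hdef : pvDigitize (f+1) (n : Int) =
          ((n % 10 : Nat) : Int) :: pvDigitize f ((n / 10 : Nat) : Int) := by
        rw [pvDigitize, if_pos hne, fd10, md10]
      refine ⟨?_, ?_, ?_⟩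
      · rw [hdef]
        simp only [pvVal, ihv]
        push_cast
        omega
      · intro d hd
        rw [hdef] at hd
        rcases List.mem_cons.mp hd with h1 | h1
        · subst h1
          constructor
          · positivity
          · have : n % 10 < 10 := by omega
            exact_mod_cast Nat.le_of_lt_succ (by omega)
        · exact ihok d h1
      · intro _
        rw [hdef]
        refine ⟨by simp, ?_⟩
        rcases Nat.eq_zero_or_pos (n / 10) with hq0 | hqpos
        · rw [hq0]
          simp [pvDigitize_zero]
          omega
        · obtain ⟨hne', hlen⟩ := ihne (by omega)
          have hlp : 1 ≤ (pvDigitize f ((n / 10 : Nat) : Int)).length :=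
            List.length_pos_iff.mpr hne'
          simp only [List.length_cons]
          have e1 : (pvDigitize f ((n/10 : Nat) : Int)).length + 1 - 1
              = ((pvDigitize f ((n/10 : Nat) : Int)).length - 1) + 1 := by omega
          rw [e1, pow_succ]
          calc 10 ^ ((pvDigitize f ((n/10:Nat):Int)).length - 1) * 10 ≤ (n / 10) * 10 :=
                Nat.mul_le_mul_right _ hlen
            _ ≤ n := by omega

lemma pvCumul_eq (sn en : Nat) (h : sn ≤ en) :
    pvCumul (sn : Int) (en : Int) = ((triN (en + 1) : Int) - triN sn) := by
  unfold pvCumul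
  rw [PySem.Int.floordiv_eq_ediv_of_pos (by norm_num : (0:Int) < 2)]
  have he : ((en : Int)) * ((en : Int) + 1) = (((en * (en+1)) : Nat) : Int) := by push_cast; ring
  have hs : ((sn : Int)) * ((sn : Int) - 1) = (((sn * (sn-1)) : Nat) : Int) := by
    cases sn with
    | zero => simp
    | succ k =>
      simp only [Nat.add_sub_cancel]
      push_cast
      ring
  rw [he, hs]
  have hde : (2:Nat) ∣ en * (en+1) := (Nat.even_mul_succ_self en).two_dvd
  have hds : (2:Nat) ∣ sn * (sn-1) := by
    cases sn with
    | zero => simp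
    | succ k =>
      have := (Nat.even_mul_succ_self k).two_dvd
      simpa [Nat.mul_comm] using this
  have he2 : (en * (en+1) : Nat) = 2 * triN (en+1) := by
    unfold triN
    simp only [Nat.add_sub_cancel]
    rw [Nat.mul_comm en (en+1)] at hde ⊢
    exact (Nat.mul_div_cancel' hde).symm
  have hs2 : (sn * (sn-1) : Nat) = 2 * triN sn := by
    unfold triN
    exact (Nat.mul_div_cancel' hds).symm
  rw [he2, hs2]
  push_cast
  rw [show (2:Int) * (triN (en+1) : Int) - 2 * (triN sn : Int)
      = 2 * ((triN (en+1) : Int) - triN sn) by ring]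
  exact Int.mul_ediv_cancel_left _ (by norm_num)

lemma pvDigitsOk_append_left {S C : List Int} (h : pvDigitsOk (S ++ C)) : pvDigitsOk S :=
  fun d hd => h d (List.mem_append.mpr (Or.inl hd))

lemma pvDigitsOk_append_right {S C : List Int} (h : pvDigitsOk (S ++ C)) : pvDigitsOk C :=
  fun d hd => h d (List.mem_append.mpr (Or.inr hd))

lemma pvDigitsOk_replicate9 (m : Nat) : pvDigitsOk (List.replicate m 9) := by
  intro d hd
  have := List.eq_of_mem_replicate hd
  subst this; norm_num

lemma pvDigitsOk_replicate0 (m : Nat) : pvDigitsOk (List.replicate m 0) := by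
  intro d hd
  have := List.eq_of_mem_replicate hd
  subst this; norm_num

lemma pvUnit_correct : ∀ (f : Nat) (S E : List Int), S.length < f → S.length = E.length →
    pvDigitsOk S → pvDigitsOk E → pvVal S ≤ pvVal E →
    pvUnit f S E = (pvVal E - pvVal S + 1,
      ((Dsum ((pvVal E).toNat + 1) : Nat) : Int) - ((Dsum ((pvVal S).toNat) : Nat) : Int)) := by
  intro f
  induction f with
  | zero => intro S E hf; exact absurd hf (Nat.not_lt_zero _)
  | succ f ih =>
    intro S E hf hl okS okE hle
    obtain ⟨C, S', E', h1, h2, h3, h4, h5⟩ := pvPopLoop_spec S.length S E 0 le_rfl hl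
    rw [zero_add] at h4
    have okS' : pvDigitsOk S' := pvDigitsOk_append_left (h1 ▸ okS)
    have okC : pvDigitsOk C := pvDigitsOk_append_right (h1 ▸ okS)
    have okE' : pvDigitsOk E' := pvDigitsOk_append_left (h2 ▸ okE)
    set m := S'.length with hm
    have hvS : pvVal S = pvVal S' + 10 ^ m * pvVal C := by rw [h1, pvVal_append]
    have hvE : pvVal E = pvVal E' + 10 ^ m * pvVal C := by rw [h2, pvVal_append, ← h3]
    have ha0 : 0 ≤ pvVal S' := pvVal_nonneg _ okS'
    have haP : pvVal S' < 10 ^ m := pvVal_lt _ okS'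
    have hb0 : 0 ≤ pvVal E' := pvVal_nonneg _ okE'
    have hbP : pvVal E' < 10 ^ m := by
      have := pvVal_lt _ okE'
      rwa [← h3] at this
    have hH0 : 0 ≤ pvVal C := pvVal_nonneg _ okC
    have hab : pvVal S' ≤ pvVal E' := by
      rw [hvS, hvE] at hle
      linarith
    rw [pvUnit]
    rw [if_pos hl, h4]
    simp only
    by_cases hcs : C.sum ≠ 0
    · rw [if_pos hcs]
      have hCne : C ≠ [] := by intro h; subst h; simp at hcs
      have hmf : S'.length < f := by
        have hlen : S.length = S'.length + C.length := by rw [h1]; simp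
        have : 0 < C.length := List.length_pos_iff.mpr hCne
        omega
      rw [ih S' E' hmf h3 okS' okE' hab]
      simp only [Prod.mk.injEq]
      constructor
      · rw [hvS, hvE]; ring
      · -- digit-sum component
        obtain ⟨an, han⟩ : ∃ an : Nat, pvVal S' = (an : Int) :=
          ⟨(pvVal S').toNat, (Int.toNat_of_nonneg ha0).symm⟩
        obtain ⟨bn, hbn⟩ : ∃ bn : Nat, pvVal E' = (bn : Int) :=
          ⟨(pvVal E').toNat, (Int.toNat_of_nonneg hb0).symm⟩
        obtain ⟨Hn, hHn⟩ : ∃ Hn : Nat, pvVal C = (Hn : Int) :=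
          ⟨(pvVal C).toNat, (Int.toNat_of_nonneg hH0).symm⟩
        have hanP : an < 10 ^ m := by rw [han] at haP; exact_mod_cast haP
        have hbnP : bn < 10 ^ m := by rw [hbn] at hbP; exact_mod_cast hbP
        have hanbn : an ≤ bn := by rw [han, hbn] at hab; exact_mod_cast hab
        have hsum : C.sum = (dsN Hn : Int) := by
          rw [← dsN_of_digits C okC, hHn]; simp
        have htS : (pvVal S).toNat = Hn * 10 ^ m + an := by
          rw [hvS, han, hHn]
          have : ((an : Int) + 10 ^ m * Hn) = ((Hn * 10 ^ m + an : Nat) : Int) := by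
            push_cast; ring
          rw [this, Int.toNat_natCast]
        have htE : (pvVal E).toNat = Hn * 10 ^ m + bn := by
          rw [hvE, hbn, hHn]
          have : ((bn : Int) + 10 ^ m * Hn) = ((Hn * 10 ^ m + bn : Nat) : Int) := by
            push_cast; ring
          rw [this, Int.toNat_natCast]
        rw [htS, htE, han, hbn, hsum]
        simp only [Int.toNat_natCast]
        rw [Dsum_shift Hn m an (by omega),
          show Hn * 10 ^ m + bn + 1 = Hn * 10 ^ m + (bn + 1) by omega,
          Dsum_shift Hn m (bn + 1) (by omega)]
        push_cast
        ring
    · rw [if_neg hcs]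
      push_neg at hcs
      have hH : pvVal C = 0 := pvVal_zero_of_sum C okC hcs
      have hvS' : pvVal S = pvVal S' := by rw [hvS, hH]; ring
      have hvE' : pvVal E = pvVal E' := by rw [hvE, hH]; ring
      by_cases hm0 : m = 0
      · rw [if_pos hm0]
        have hS'nil : S' = [] := List.length_eq_zero_iff.mp hm0
        have hE'nil : E' = [] := List.length_eq_zero_iff.mp (by omega)
        rw [hvS', hvE', hS'nil, hE'nil]
        simp [pvVal, Dsum_one, Dsum_zero]
      · rw [if_neg hm0]
        by_cases hm1 : m = 1
        · rw [if_pos hm1]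
          obtain ⟨s0, hs0⟩ := List.length_eq_one_iff.mp hm1
          obtain ⟨e0, he0⟩ := List.length_eq_one_iff.mp (show E'.length = 1 by omega)
          rw [hvS', hvE', hs0, he0]
          simp only [List.getLastD_eq_getLast?, List.getLast?_singleton, Option.getD_some]
          have hvs0 : pvVal [s0] = s0 := by simp [pvVal]
          have hve0 : pvVal [e0] = e0 := by simp [pvVal]
          rw [hvs0, hve0]
          have hds := okS' s0 (by rw [hs0]; simp)
          have hde := okE' e0 (by rw [he0]; simp)
          have hab0 : s0 ≤ e0 := by rw [hs0] at hab; rw [he0] at hab; rwa [hvs0, hve0] at hab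
          obtain ⟨sn, hsn⟩ : ∃ sn : Nat, s0 = (sn : Int) :=
            ⟨s0.toNat, (Int.toNat_of_nonneg hds.1).symm⟩
          obtain ⟨en, hen⟩ : ∃ en : Nat, e0 = (en : Int) :=
            ⟨e0.toNat, (Int.toNat_of_nonneg hde.1).symm⟩
          have hsnen : sn ≤ en := by rw [hsn, hen] at hab0; exact_mod_cast hab0
          have hen9 : en ≤ 9 := by
            have := hde.2; rw [hen] at this; exact_mod_cast this
          rw [hsn, hen, pvCumul_eq sn en hsnen]
          simp only [Prod.mk.injEq]
          constructor
          · trivial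
          · rw [Int.toNat_natCast, Int.toNat_natCast,
              Dsum_small (en + 1) (by omega), Dsum_small sn (by omega)]
        · rw [if_neg hm1]
          -- m ≥ 2
          have hm2 : 2 ≤ m := by omega
          have hS'ne : S' ≠ [] := by
            intro h; rw [h] at hm; simp at hm; omega
          have hE'ne : E' ≠ [] := by
            intro h; rw [h] at h3; simp at h3; omega
          rcases hsl : S'.getLast? with _ | s
          · exact absurd (by simpa using hsl) hS'ne
          rcases hel : E'.getLast? with _ | e
          · exact absurd (by simpa using hel) hE'ne
          have hS'eq : S' = S'.dropLast ++ [s] := (List.dropLast_append_getLast? s hsl).symm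
          have hE'eq : E' = E'.dropLast ++ [e] := (List.dropLast_append_getLast? e hel).symm
          have hgs : S'.getLastD 0 = s := by rw [List.getLastD_eq_getLast?, hsl]; rfl
          have hge : E'.getLastD 0 = e := by rw [List.getLastD_eq_getLast?, hel]; rfl
          rw [hgs, hge]
          set S2 := S'.dropLast with hS2
          set E2 := E'.dropLast with hE2
          have hk : S2.length = m - 1 := by rw [hS2]; simp [List.length_dropLast, ← hm]
          have hkE : E2.length = m - 1 := by rw [hE2]; simp [List.length_dropLast, ← h3]
          set k := m - 1 with hkdef
          have hk1 : 1 ≤ k := by omega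
          have okS2 : pvDigitsOk S2 := pvDigitsOk_append_left (hS'eq ▸ okS')
          have okE2 : pvDigitsOk E2 := pvDigitsOk_append_left (hE'eq ▸ okE')
          have hds : 0 ≤ s ∧ s ≤ 9 := okS' s (by rw [hS'eq]; simp)
          have hde : 0 ≤ e ∧ e ≤ 9 := okE' e (by rw [hE'eq]; simp)
          have hvals : pvVal S' = pvVal S2 + 10 ^ k * s := by
            conv_lhs => rw [hS'eq]
            rw [pvVal_append, hk]
            simp [pvVal]
          have hvale : pvVal E' = pvVal E2 + 10 ^ k * e := by
            conv_lhs => rw [hE'eq]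
            rw [pvVal_append, hkE]
            simp [pvVal]
          have ha20 : 0 ≤ pvVal S2 := pvVal_nonneg _ okS2
          have ha2P : pvVal S2 < 10 ^ k := by have := pvVal_lt _ okS2; rwa [hk] at this
          have hb20 : 0 ≤ pvVal E2 := pvVal_nonneg _ okE2
          have hb2P : pvVal E2 < 10 ^ k := by have := pvVal_lt _ okE2; rwa [hkE] at this
          have hsne : s ≠ e := by
            have := h5 hS'ne; rwa [hgs, hge] at this
          have hPpos : (0:Int) < 10 ^ k := by positivity
          have hslt : s < e := by
            by_contra hc
            push_neg at hc
            have hes : e + 1 ≤ s := by omega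
            have h1' : pvVal E2 + 10 ^ k * e < 10 ^ k * (e + 1) := by
              have : 10 ^ k * (e+1) = 10 ^ k * e + 10 ^ k := by ring
              rw [this]; linarith
            have h2' : (10:Int) ^ k * (e + 1) ≤ 10 ^ k * s :=
              mul_le_mul_of_nonneg_left (by exact_mod_cast hes) (le_of_lt hPpos)
            have : pvVal E' < pvVal S' := by
              rw [hvals, hvale]
              have : (0:Int) ≤ pvVal S2 := ha20
              linarith
            omega
          -- recursive calls
          have hkf : S2.length < f := by
            have hlen : S.length = S'.length + C.length := by rw [h1]; simp
            omega
          have hvf := ih S2 (List.replicate S2.length 9) hkf (by simp)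
            okS2 (pvDigitsOk_replicate9 _) (by
              rw [pvVal_replicate9, hk]
              omega)
          have hve := ih (List.replicate E2.length 0) E2
            (by rw [List.length_replicate, hkE]; omega) (by simp)
            (pvDigitsOk_replicate0 _) okE2 (by rw [pvVal_replicate0]; exact hb20)
          rw [pvVal_replicate9, hk] at hvf
          rw [pvVal_replicate0] at hve
          rw [hkE] at hve
          -- Nat forms
          obtain ⟨sn, hsn⟩ : ∃ sn : Nat, s = (sn : Int) :=
            ⟨s.toNat, (Int.toNat_of_nonneg hds.1).symm⟩
          obtain ⟨en, hen⟩ : ∃ en : Nat, e = (en : Int) :=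
            ⟨e.toNat, (Int.toNat_of_nonneg hde.1).symm⟩
          obtain ⟨a2, ha2⟩ : ∃ a2 : Nat, pvVal S2 = (a2 : Int) :=
            ⟨(pvVal S2).toNat, (Int.toNat_of_nonneg ha20).symm⟩
          obtain ⟨b2, hb2⟩ : ∃ b2 : Nat, pvVal E2 = (b2 : Int) :=
            ⟨(pvVal E2).toNat, (Int.toNat_of_nonneg hb20).symm⟩
          have hsnen : sn < en := by rw [hsn, hen] at hslt; exact_mod_cast hslt
          have hen9 : en ≤ 9 := by have := hde.2; rw [hen] at this; exact_mod_cast this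
          have ha2k : a2 < 10 ^ k := by rw [ha2] at ha2P; exact_mod_cast ha2P
          have hb2k : b2 < 10 ^ k := by rw [hb2] at hb2P; exact_mod_cast hb2P
          -- toNat conversions
          have htS : (pvVal S).toNat = sn * 10 ^ k + a2 := by
            rw [hvS', hvals, ha2, hsn]
            have : ((a2 : Int) + 10 ^ k * sn) = ((sn * 10 ^ k + a2 : Nat) : Int) := by
              push_cast; ring
            rw [this, Int.toNat_natCast]
          have htE : (pvVal E).toNat = en * 10 ^ k + b2 := by
            rw [hvE', hvale, hb2, hen]
            have : ((b2 : Int) + 10 ^ k * en) = ((en * 10 ^ k + b2 : Nat) : Int) := by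
              push_cast; ring
            rw [this, Int.toNat_natCast]
          -- Dsum facts
          have hshiftS : Dsum (sn * 10 ^ k + a2) = Dsum (sn * 10 ^ k) + a2 * sn + Dsum a2 := by
            rw [Dsum_shift sn k a2 (by omega), dsN_lt10 sn (by omega)]
          have hshiftE : Dsum (en * 10 ^ k + b2 + 1) = Dsum (en * 10 ^ k) + (b2+1) * en + Dsum (b2+1) := by
            rw [show en * 10 ^ k + b2 + 1 = en * 10 ^ k + (b2 + 1) by omega,
              Dsum_shift en k (b2+1) (by omega), dsN_lt10 en (by omega)]
          have hlead := Dsum_lead k sn en (by omega) (by omega)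
          have hvf19 : ((10:Int) ^ k - 1).toNat + 1 = 10 ^ k := by
            have h1le : 1 ≤ (10:Nat) ^ k := Nat.pow_pos (by norm_num)
            have hcast : (((10 ^ k - 1 : Nat)) : Int) = (10:Int) ^ k - 1 := by
              rw [Nat.cast_sub h1le]; push_cast; ring
            rw [← hcast, Int.toNat_natCast]
            omega
          rw [hvf19] at hvf
          have htb2 : ((pvVal E2).toNat) = b2 := by rw [hb2, Int.toNat_natCast]
          have hta2 : ((pvVal S2).toNat) = a2 := by rw [ha2, Int.toNat_natCast]
          rw [ha2] at hvf
          rw [hb2] at hve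
          rw [Int.toNat_natCast] at hvf
          rw [Int.toNat_natCast] at hve
          simp only [Int.toNat_zero, Dsum_zero] at hve
          -- now split the final if
          by_cases h1e : e - s = 1
          · rw [if_pos h1e]
            rw [hk, hkE, hvf, hve]
            have hen' : en = sn + 1 := by
              rw [hsn, hen] at h1e
              omega
            simp only [Prod.mk.injEq]
            constructor
            · rw [hvS', hvE', hvals, hvale, ha2, hb2, hsn, hen, hen']
              push_cast
              ring
            · rw [hvS', hvE', hvals, hvale, ha2, hb2, hsn, hen] at *
              rw [htS, htE, hshiftS, hshiftE]
              push_cast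
              rw [hlead, hen', triN_succ]
              push_cast
              ring
          · rw [if_neg h1e]
            rw [hk, hkE, hvf, hve]
            have hen2 : sn + 2 ≤ en := by
              rw [hsn, hen] at h1e hslt
              omega
            have hcum : pvCumul (s + 1) (e - 1) = ((triN en : Int) - triN (sn + 1)) := by
              rw [hsn, hen,
                show ((sn:Int) + 1) = ((sn + 1 : Nat) : Int) by push_cast; ring,
                show ((en:Int) - 1) = ((en - 1 : Nat) : Int) by push_cast [show 1 ≤ en by omega]; ring,
                pvCumul_eq (sn+1) (en-1) (by omega),
                show en - 1 + 1 = en by omega]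
            have hpowk : ((Dsum (10 ^ k) : Nat) : Int) = (k : Int) * 45 * 10 ^ (k - 1) := by
              rw [Dsum_pow k hk1]
              push_cast
              ring
            simp only [Prod.mk.injEq]
            constructor
            · rw [hvS', hvE', hvals, hvale, ha2, hb2, hsn, hen]
              push_cast
              ring
            · rw [hcum]
              rw [hvS', hvE', hvals, hvale, ha2, hb2, hsn, hen] at *
              rw [htS, htE, hshiftS, hshiftE]
              rw [show ((en:Int) - sn - 1) * (k:Int) * 45 * 10 ^ (k-1)
                  = ((en:Int) - sn - 1) * ((k : Int) * 45 * 10 ^ (k - 1)) by ring, ← hpowk]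
              push_cast
              rw [hlead, triN_succ]
              push_cast
              ring


-- telescoped value of A's range' loop (the full-decade blocks), second component
lemma pvLoop_snd (c : Nat) : ∀ (t : Nat) (x y : Int), 1 ≤ t →
    (((List.range' (t + 1) c).foldl
      (fun (acc : Int × Int) (i : Nat) =>
        (acc.1 + (10 : Int) ^ i,
         acc.2 + 45 * (10 : Int) ^ (i - 1) + ((i : Int) - 1) * 45 * 9 * (10 : Int) ^ (i - 2)))
      (x, y)).2)
      = y + ((Dsum (10 ^ (t + c)) : Nat) : Int) - ((Dsum (10 ^ t) : Nat) : Int) := by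
  induction c with
  | zero => intro t x y ht; simp
  | succ c ih =>
    intro t x y ht
    rw [List.range'_succ, List.foldl_cons]
    simp only
    have hstep := ih (t + 1) (x + (10:Int) ^ (t+1))
      (y + 45 * (10 : Int) ^ (t + 1 - 1) + (((t+1 : Nat) : Int) - 1) * 45 * 9 * (10 : Int) ^ (t + 1 - 2))
      (by omega)
    rw [show t + 1 + 1 = t + 2 from rfl] at hstep
    rw [hstep]
    have he : t + 1 + c = t + (c + 1) := by omega
    rw [he]
    obtain ⟨j, rfl⟩ : ∃ j, t = j + 1 := ⟨t - 1, by omega⟩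
    have h1 : Dsum (10 ^ (j + 1 + 1)) = (j + 2) * 45 * 10 ^ (j + 1) := by
      rw [Dsum_pow (j + 2) (by omega)]; rfl
    have h2 : Dsum (10 ^ (j + 1)) = (j + 1) * 45 * 10 ^ j := by
      rw [Dsum_pow (j + 1) (by omega)]; rfl
    simp only [Nat.add_sub_cancel, show j + 1 + 1 - 2 = j by omega,
      show j + 1 - 1 = j by omega, h1, h2]
    push_cast
    ring

lemma pow10_toNat (k : Nat) : ((10:Int) ^ k).toNat = 10 ^ k := by
  have h : ((10:Int) ^ k) = (((10 ^ k : Nat)) : Int) := by push_cast; ring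
  rw [h, Int.toNat_natCast]

lemma pow10_sub_one_toNat (k : Nat) : ((10:Int) ^ k - 1).toNat + 1 = 10 ^ k := by
  have h1le : 1 ≤ (10:Nat) ^ k := Nat.pow_pos (by norm_num)
  have hcast : (((10 ^ k - 1 : Nat)) : Int) = (10:Int) ^ k - 1 := by
    rw [Nat.cast_sub h1le]; push_cast; ring
  rw [← hcast, Int.toNat_natCast]
  omega

theorem sum_all_digit_eq (L U : Int) (hDom : Dom_sum_all_digit L U)
    (hPre : Pre_sum_all_digit L U) : sum_all_digit L U = sum_all_digit_alt L U := by
  obtain ⟨hL0, hLU, hPre3⟩ := hPre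
  have hDomU : U ≤ 2147483648 := by
    unfold Dom_sum_all_digit pvDomInt at hDom
    simp at hDom
    omega
  obtain ⟨ln, rfl⟩ : ∃ n : Nat, L = (n : Int) := ⟨L.toNat, (Int.toNat_of_nonneg hL0).symm⟩
  obtain ⟨un, rfl⟩ : ∃ n : Nat, U = (n : Int) :=
    ⟨U.toNat, (Int.toNat_of_nonneg (le_trans hL0 hLU)).symm⟩
  have hlnun : ln ≤ un := by exact_mod_cast hLU
  have hun31 : un ≤ 2147483648 := by exact_mod_cast hDomU
  have hun64 : un < 10 ^ 64 := by
    have h : (2147483648 : Nat) < 10 ^ 64 := by norm_num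
    omega
  have hln64 : ln < 10 ^ 64 := by omega
  have hB : sum_all_digit_alt (ln : Int) (un : Int)
      = ((Dsum (un + 1) : Nat) : Int) - ((Dsum ln : Nat) : Int) := by
    unfold sum_all_digit_alt
    rw [show ((un:Int) + 1) = ((un + 1 : Nat) : Int) by push_cast; ring]
    rw [pvD_eq 64 (un + 1) (by omega) (le_refl _), pvD_eq 64 ln hln64 (le_refl _)]
  rw [hB]
  unfold sum_all_digit
  obtain ⟨hSv, hSok, hSne⟩ := pvDigitize_spec 64 ln hln64
  obtain ⟨hEv, hEok, hEne⟩ := pvDigitize_spec 64 un hun64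
  set Sd := pvDigitize 64 (ln : Int) with hSd
  set Ed := pvDigitize 64 (un : Int) with hEd
  have hSzero : ln = 0 → Sd = [] := by
    intro h0
    rw [hSd, h0]
    exact_mod_cast pvDigitize_zero 64
  have hEzero : un = 0 → Ed = [] := by
    intro h0
    rw [hEd, h0]
    exact_mod_cast pvDigitize_zero 64
  have hlenS : Sd.length ≤ 10 := by
    by_contra hc
    push_neg at hc
    have hne : ln ≠ 0 := by
      intro h0
      rw [hSzero h0] at hc
      simp at hc
    obtain ⟨_, hpow⟩ := hSne hne
    have hmono : (10:Nat) ^ 10 ≤ 10 ^ (Sd.length - 1) :=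
      Nat.pow_le_pow_right (by norm_num) (by omega)
    have h10 : (10:Nat) ^ 10 = 10000000000 := by norm_num
    omega
  have hlenE : Ed.length ≤ 10 := by
    by_contra hc
    push_neg at hc
    have hne : un ≠ 0 := by
      intro h0
      rw [hEzero h0] at hc
      simp at hc
    obtain ⟨_, hpow⟩ := hEne hne
    have hmono : (10:Nat) ^ 10 ≤ 10 ^ (Ed.length - 1) :=
      Nat.pow_le_pow_right (by norm_num) (by omega)
    have h10 : (10:Nat) ^ 10 = 10000000000 := by norm_num
    omega
  have hvSE : pvVal Sd ≤ pvVal Ed := by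
    rw [hSv, hEv]
    exact_mod_cast hlnun
  by_cases hll : Sd.length = Ed.length
  · rw [pvUnit_correct 64 Sd Ed (by omega) hll hSok hEok hvSE]
    simp only
    rw [hSv, hEv, Int.toNat_natCast, Int.toNat_natCast]
  · have hlSlE : Sd.length < Ed.length := by
      rcases Nat.lt_or_ge Sd.length Ed.length with h | h
      · exact h
      · exfalso
        have hEltS : Ed.length < Sd.length := by omega
        have hlnne : ln ≠ 0 := by
          intro h0
          rw [hSzero h0] at hEltS
          simp at hEltS
        obtain ⟨_, hpow⟩ := hSne hlnne
        have hunlt : ((un:Nat) : Int) < 10 ^ Ed.length := hEv ▸ pvVal_lt Ed hEok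
        have hunn : un < 10 ^ Ed.length := by exact_mod_cast hunlt
        have hmono : (10:Nat) ^ Ed.length ≤ 10 ^ (Sd.length - 1) :=
          Nat.pow_le_pow_right (by norm_num) (by omega)
        omega
    have hunne : un ≠ 0 := by
      intro h0
      rw [hEzero h0] at hlSlE
      simp at hlSlE
    obtain ⟨hEdne', hpowE⟩ := hEne hunne
    have hlE1 : 1 ≤ Ed.length := List.length_pos_iff.mpr hEdne'
    rw [show (64:Nat) = 63 + 1 from rfl, pvUnit, if_neg hll]
    simp only
    have hveList : (List.replicate (Ed.length - 1) (0:Int) ++ [1]).length = Ed.length := by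
      simp
      omega
    have hveOk : pvDigitsOk (List.replicate (Ed.length - 1) (0:Int) ++ [1]) := by
      intro d hd
      rcases List.mem_append.mp hd with h | h
      · exact pvDigitsOk_replicate0 _ d h
      · simp at h
        subst h
        norm_num
    have hveVal : pvVal (List.replicate (Ed.length - 1) (0:Int) ++ [1]) = 10 ^ (Ed.length - 1) := by
      rw [pvVal_append, pvVal_replicate0]
      simp [pvVal]
    have hve := pvUnit_correct 63 _ Ed (by rw [hveList]; omega) hveList hveOk hEok
      (by rw [hveVal, hEv]
          have h : (((10:Nat) ^ (Ed.length - 1) : Nat) : Int) ≤ ((un : Nat) : Int) := by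
            exact_mod_cast hpowE
          push_cast at h ⊢
          omega)
    have hSlt : ((ln:Nat) : Int) < 10 ^ Sd.length := hSv ▸ pvVal_lt Sd hSok
    have hvf := pvUnit_correct 63 Sd (List.replicate Sd.length 9) (by omega) (by simp)
      hSok (pvDigitsOk_replicate9 _)
      (by rw [pvVal_replicate9, hSv]; omega)
    rw [hvf, hve, hveVal, hSv, hEv, pvVal_replicate9,
      Int.toNat_natCast, Int.toNat_natCast, pow10_sub_one_toNat, pow10_toNat]
    rcases Nat.eq_zero_or_pos Sd.length with hS0 | hSpos
    · have hln0 : ln = 0 := by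
        by_contra h0
        obtain ⟨hne', _⟩ := hSne h0
        exact hne' (List.length_eq_zero_iff.mp hS0)
      have hun10 : un < 10 := by
        by_contra hc
        push_neg at hc
        exact hPre3 ⟨by exact_mod_cast hln0, by exact_mod_cast hc⟩
      have hlE1' : Ed.length = 1 := by
        by_contra hc
        have h2 : 2 ≤ Ed.length := by omega
        have hmono : (10:Nat) ^ 1 ≤ 10 ^ (Ed.length - 1) :=
          Nat.pow_le_pow_right (by norm_num) (by omega)
        omega
      rw [hS0, hlE1']
      simp [hln0, Dsum_one, Dsum_zero, List.range']
    · rw [pvLoop_snd (Ed.length - Sd.length - 1) Sd.length 0 0 hSpos,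
        show Sd.length + (Ed.length - Sd.length - 1) = Ed.length - 1 by omega]
      ring

-- ===== VERDICT (by name: the statement is the Claim_ definition above) =====
theorem sum_all_digit_spec : Claim_equal_sum_all_digit := by
  intro L U hDom hPre
  unfold Spec_sum_all_digit
  exact sum_all_digit_eq L U hDom hPre
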